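-- pv_equiv track=rewrite | github.com/oqtopus-team/qdash | src/qdash/workflow/engine/calibration/scheduler/one_qubit_scheduler.py | _group_qids_by_mux
-- ===== SOURCE A (Python) =====
-- def _group_qids_by_mux(
--
--     qids: list[str],
--     qid_to_mux: dict[str, int],
-- ) -> list[list[str]]:
--     """Group qubit IDs by their MUX for parallel execution.
--
--     Qubits on different MUXes can run in parallel, while qubits on the
--     same MUX must run sequentially.
--
--     Args:
--         qids: List of qubit IDs to group
--         qid_to_mux: Mapping from qubit ID to MUX ID
--
--     Returns:
--         List of qubit groups, where each group contains qubits from the same MUX.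
--         Groups are sorted by MUX ID for deterministic ordering.
--     """
--     mux_groups: dict[int, list[str]] = {}
--     for qid in qids:
--         mux_id = qid_to_mux.get(qid, int(qid) // 4)  # Default: 4 qubits per MUX
--         if mux_id not in mux_groups:
--             mux_groups[mux_id] = []
--         mux_groups[mux_id].append(qid)
--
--     # Return groups sorted by MUX ID
--     return [mux_groups[mux_id] for mux_id in sorted(mux_groups.keys())]
-- ===== SOURCE B (Python) =====
-- def _group_qids_by_mux(
--     qids: list[str],
--     qid_to_mux: dict[str, int],
-- ) -> list[list[str]]:
--     """Sort qids by MUX key (stable), then split the sorted list into runs of equal key."""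
--
--     def key(qid: str) -> int:
--         return qid_to_mux.get(qid, int(qid) // 4)
--
--     ordered = sorted(qids, key=key)
--     groups: list[list[str]] = []
--     i = 0
--     n = len(ordered)
--     while i < n:
--         k = key(ordered[i])
--         j = i
--         while j < n and key(ordered[j]) == k:
--             j += 1
--         groups.append(ordered[i:j])
--         i = j
--     return groups
-- ===== Notes on version B (the rewrite author's own statement) =====
-- stated objective: alternative
-- what changed: Replaces A's dict-of-lists accumulation followed by sorting the dict keys with a stable sort of the qids by their MUX key followed by a single scan that splits the sorted list into runs of equal key.
import Mathlib
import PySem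

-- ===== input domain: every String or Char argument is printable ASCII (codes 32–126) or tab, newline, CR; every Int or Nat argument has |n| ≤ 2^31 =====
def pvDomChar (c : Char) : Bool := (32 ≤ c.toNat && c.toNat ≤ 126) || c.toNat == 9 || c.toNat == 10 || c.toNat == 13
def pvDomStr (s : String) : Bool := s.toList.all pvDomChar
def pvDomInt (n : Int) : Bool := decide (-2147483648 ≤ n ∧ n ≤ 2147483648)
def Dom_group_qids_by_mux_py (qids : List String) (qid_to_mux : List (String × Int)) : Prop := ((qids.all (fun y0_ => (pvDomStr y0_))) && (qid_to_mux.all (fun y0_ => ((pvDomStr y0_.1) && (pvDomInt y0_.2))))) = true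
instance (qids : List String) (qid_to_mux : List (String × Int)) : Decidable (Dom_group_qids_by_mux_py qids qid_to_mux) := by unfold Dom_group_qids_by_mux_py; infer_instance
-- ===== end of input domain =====

-- B replaces A's dict-of-lists accumulation + key sort by a stable sort of the qids by MUX key
-- followed by one scan splitting the sorted list into runs of equal key (alternative algorithm,
-- same observable result).

-- ===== PORT A =====
-- qid_to_mux.get(qid, int(qid) // 4): Python evaluates the default int(qid) // 4 EAGERLY,
-- so int(qid) raises (none) even when qid is a key of the dict.
def pvAKey (d : PySem.Dict String Int) (qid : String) : Option Int :=
  (PySem.Int.ofStr? qid).map (fun n => d.getD qid (PySem.Int.floordiv n 4))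

def group_qids_by_mux_py (qids : List String) (qid_to_mux : List (String × Int)) : List (List String) :=
  -- the accumulation loop; `none` marks the ValueError from int(qid)
  match qids.foldl
      (fun acc qid => acc.bind fun g =>
        (pvAKey (PySem.Dict.ofList qid_to_mux) qid).map fun mux_id =>
          g.modify mux_id [] (fun l => l ++ [qid]))
      (some PySem.Dict.empty) with
  | none => []   -- unreachable under Pre_ (Python raises ValueError here)
  | some mux_groups =>
      (PySem.List.sorted mux_groups.keys (fun m => m)).map (fun mux_id => mux_groups.getD mux_id [])

-- ===== PORT B =====
def pvBKey (d : PySem.Dict String Int) (qid : String) : Option Int :=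
  (PySem.Int.ofStr? qid).map (fun n => d.getD qid (PySem.Int.floordiv n 4))

-- decorate each qid with its key (what sorted(qids, key=key) computes first); none = ValueError
def pvDecorate (d : PySem.Dict String Int) : List String → Option (List (String × Int))
  | [] => some []
  | q :: rest =>
    match pvBKey d q with
    | none => none
    | some m => (pvDecorate d rest).map (fun ps => (q, m) :: ps)

-- the run-splitting scan: the outer while loop of Source B; takeWhile/dropWhile is the inner j-scan
def pvRuns : List (String × Int) → List (List String)
  | [] => []
  | (q, m) :: rest =>
      (((q, m) :: rest.takeWhile (fun p => p.2 == m)).map (fun p => p.1))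
        :: pvRuns (rest.dropWhile (fun p => p.2 == m))
termination_by s => s.length
decreasing_by
  simp only [List.length_cons]
  exact Nat.lt_succ_of_le (List.length_dropWhile_le _ _)

def group_qids_by_mux_py_alt (qids : List String) (qid_to_mux : List (String × Int)) : List (List String) :=
  match pvDecorate (PySem.Dict.ofList qid_to_mux) qids with
  | none => []   -- unreachable under Pre_
  | some ps => pvRuns (PySem.List.sorted ps (fun p => p.2))

-- ===== PRECONDITION & SPEC =====
-- Pre_ excludes exactly the inputs on which Python A raises ValueError: the dict-lookup default
-- int(qid) // 4 is evaluated for EVERY qid, so every qid must parse as a Python int.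
def Pre_group_qids_by_mux_py (qids : List String) (_qid_to_mux : List (String × Int)) : Prop :=
  ∀ q ∈ qids, (PySem.Int.ofStr? q).isSome = true
instance (qids : List String) (qid_to_mux : List (String × Int)) : Decidable (Pre_group_qids_by_mux_py qids qid_to_mux) := by unfold Pre_group_qids_by_mux_py; infer_instance

def pvWitness_group_qids_by_mux_py : List String × (List (String × Int)) :=
  (["0", "1", "5", "4"], [("5", 0)])

def Spec_group_qids_by_mux_py (qids : List String) (qid_to_mux : List (String × Int)) (out : List (List String)) : Prop := out = group_qids_by_mux_py_alt qids qid_to_mux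
instance (qids : List String) (qid_to_mux : List (String × Int)) (out : List (List String)) : Decidable (Spec_group_qids_by_mux_py qids qid_to_mux out) := by unfold Spec_group_qids_by_mux_py; infer_instance

-- ===== CLAIM (what is proved, stated in full; the proofs are below) =====
def Claim_equal_group_qids_by_mux_py : Prop := ∀ (qids : List String) (qid_to_mux : List (String × Int)), Dom_group_qids_by_mux_py qids qid_to_mux → Pre_group_qids_by_mux_py qids qid_to_mux → Spec_group_qids_by_mux_py qids qid_to_mux (group_qids_by_mux_py qids qid_to_mux)

-- ===== LEMMAS AND PROOFS =====

-- the total MUX key both sides compute under Pre_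
def pvK (d : PySem.Dict String Int) (q : String) : Int :=
  d.getD q (PySem.Int.floordiv ((PySem.Int.ofStr? q).getD 0) 4)

-- the common canonical value
def pvC (d : PySem.Dict String Int) (qids : List String) : List (List String) :=
  (PySem.List.sorted (PySem.Set.ofList (qids.map (pvK d))) (fun m => m)).map
    (fun m => qids.filter (fun q => pvK d q == m))

theorem pvAKey_eq_some (d : PySem.Dict String Int) (q : String)
    (h : (PySem.Int.ofStr? q).isSome = true) : pvAKey d q = some (pvK d q) := by
  unfold pvAKey pvK
  cases hq : PySem.Int.ofStr? q
  · rw [hq] at h; simp at h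
  · simp

theorem pvBKey_eq_some (d : PySem.Dict String Int) (q : String)
    (h : (PySem.Int.ofStr? q).isSome = true) : pvBKey d q = some (pvK d q) :=
  pvAKey_eq_some d q h

-- ===== A side =====

theorem pvAFold_eq (d : PySem.Dict String Int) (qids : List String)
    (h : ∀ q ∈ qids, (PySem.Int.ofStr? q).isSome = true) (g0 : PySem.Dict Int (List String)) :
    qids.foldl
      (fun acc qid => acc.bind fun g =>
        (pvAKey d qid).map fun mux_id => g.modify mux_id [] (fun l => l ++ [qid]))
      (some g0)
    = some (qids.foldl (fun g q => g.modify (pvK d q) [] (fun l => l ++ [q])) g0) := by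
  induction qids generalizing g0 with
  | nil => rfl
  | cons q rest ih =>
    simp only [List.foldl_cons, pvAKey_eq_some d q (h q (by simp)), Option.bind_some,
      Option.map_some]
    exact ih (fun x hx => h x (by simp [hx])) _

theorem pvAPlain_getD (d : PySem.Dict String Int) (qids : List String) (m : Int) :
    (qids.foldl (fun g q => g.modify (pvK d q) [] (fun l => l ++ [q])) PySem.Dict.empty).getD m []
    = qids.filter (fun q => pvK d q == m) := by
  have h1 : qids.foldl (fun g q => g.modify (pvK d q) [] (fun l => l ++ [q])) PySem.Dict.empty
      = (qids.map (fun q => (pvK d q, q))).foldl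
          (fun g p => g.modify p.1 [] (fun l => l ++ [p.2])) PySem.Dict.empty := by
    rw [List.foldl_map]
  rw [h1, PySem.Dict.getD_foldl_modify_append, List.filter_map, List.map_map]
  simp [Function.comp_def]

theorem pvAPlain_keys (d : PySem.Dict String Int) (qids : List String) :
    (qids.foldl (fun g q => g.modify (pvK d q) [] (fun l => l ++ [q])) PySem.Dict.empty).keys
    = PySem.Set.ofList (qids.map (pvK d)) := by
  rw [PySem.Dict.keys_foldl_modify_key qids (pvK d) [] (fun _ q => (fun l => l ++ [q]))]
  rfl

theorem pvA_eq_C (qids : List String) (qid_to_mux : List (String × Int))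
    (h : ∀ q ∈ qids, (PySem.Int.ofStr? q).isSome = true) :
    group_qids_by_mux_py qids qid_to_mux = pvC (PySem.Dict.ofList qid_to_mux) qids := by
  unfold group_qids_by_mux_py
  rw [pvAFold_eq (PySem.Dict.ofList qid_to_mux) qids h PySem.Dict.empty]
  dsimp only
  rw [pvAPlain_keys]
  exact List.map_congr_left
    (fun m _ => pvAPlain_getD (PySem.Dict.ofList qid_to_mux) qids m)

-- ===== B side =====

theorem pvDecorate_eq (d : PySem.Dict String Int) (qids : List String)
    (h : ∀ q ∈ qids, (PySem.Int.ofStr? q).isSome = true) :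
    pvDecorate d qids = some (qids.map (fun q => (q, pvK d q))) := by
  induction qids with
  | nil => rfl
  | cons q rest ih =>
    simp only [pvDecorate, pvBKey_eq_some d q (h q (by simp)),
      ih (fun x hx => h x (by simp [hx])), Option.map_some, List.map_cons]

-- stability of the insertion sort, phrased as filter-preservation for one key value
theorem pvFilter_insertBy (x : String × Int) (acc : List (String × Int)) (m : Int)
    (hacc : acc.Pairwise (fun a b => a.2 ≤ b.2)) :
    (PySem.List.insertBy (fun a b => decide (a.2 < b.2)) x acc).filter (fun p => p.2 == m)
    = if x.2 = m then acc.filter (fun p => p.2 == m) ++ [x]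
      else acc.filter (fun p => p.2 == m) := by
  induction acc with
  | nil =>
    by_cases hxm : x.2 = m <;> simp [PySem.List.insertBy, hxm]
  | cons y ys ih =>
    have hy : ∀ z ∈ ys, y.2 ≤ z.2 := fun z hz => List.rel_of_pairwise_cons hacc hz
    simp only [PySem.List.insertBy]
    by_cases hlt : x.2 < y.2
    · simp only [hlt, decide_true, if_true]
      by_cases hxm : x.2 = m
      · have hnil : (y :: ys).filter (fun p => p.2 == m) = [] := by
          rw [List.filter_eq_nil_iff]
          intro z hz
          rcases List.mem_cons.1 hz with rfl | hz₂
          · simp only [beq_iff_eq]; omega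
          · have := hy z hz₂; simp only [beq_iff_eq]; omega
        have hx : List.filter (fun p => p.2 == m) (x :: y :: ys)
            = x :: List.filter (fun p => p.2 == m) (y :: ys) := by
          rw [List.filter_cons]; simp [hxm]
        rw [hx, if_pos hxm, hnil]
        simp
      · have hx : List.filter (fun p => p.2 == m) (x :: y :: ys)
            = List.filter (fun p => p.2 == m) (y :: ys) := by
          rw [List.filter_cons]; simp [hxm]
        rw [hx, if_neg hxm]
    · rw [if_neg (by simp [hlt])]
      rw [List.filter_cons, List.filter_cons, ih hacc.of_cons]
      by_cases hxm : x.2 = m <;> by_cases hym : y.2 = m <;> simp [hxm, hym]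

theorem pvInsertBy_pairwise (x : String × Int) (acc : List (String × Int))
    (hacc : acc.Pairwise (fun a b => a.2 ≤ b.2)) :
    (PySem.List.insertBy (fun a b => decide (a.2 < b.2)) x acc).Pairwise
      (fun a b => a.2 ≤ b.2) := by
  induction acc with
  | nil => simp [PySem.List.insertBy]
  | cons y ys ih =>
    have hy : ∀ z ∈ ys, y.2 ≤ z.2 := fun z hz => List.rel_of_pairwise_cons hacc hz
    simp only [PySem.List.insertBy]
    by_cases hlt : x.2 < y.2
    · simp only [hlt, decide_true, if_true]
      refine List.Pairwise.cons ?_ hacc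
      intro z hz
      rcases List.mem_cons.1 hz with rfl | hz₂
      · omega
      · have := hy z hz₂; omega
    · rw [if_neg (by simp [hlt])]
      refine List.Pairwise.cons ?_ (ih hacc.of_cons)
      intro z hz
      rw [PySem.List.mem_insertBy] at hz
      rcases hz with rfl | hz₂
      · omega
      · exact hy z hz₂

theorem pvFilter_foldl_insertBy (ps : List (String × Int)) (acc : List (String × Int)) (m : Int)
    (hacc : acc.Pairwise (fun a b => a.2 ≤ b.2)) :
    (ps.foldl (fun acc x => PySem.List.insertBy (fun a b => decide (a.2 < b.2)) x acc)
        acc).filter (fun p => p.2 == m)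
    = acc.filter (fun p => p.2 == m) ++ ps.filter (fun p => p.2 == m) := by
  induction ps generalizing acc with
  | nil => simp
  | cons p ps ih =>
    rw [List.foldl_cons, ih _ (pvInsertBy_pairwise p acc hacc),
      pvFilter_insertBy p acc m hacc, List.filter_cons]
    by_cases hpm : p.2 = m <;> simp [hpm]

theorem pvFilter_sorted (ps : List (String × Int)) (m : Int) :
    (PySem.List.sorted ps (fun p => p.2)).filter (fun p => p.2 == m)
    = ps.filter (fun p => p.2 == m) := by
  have hfold := pvFilter_foldl_insertBy ps [] m List.Pairwise.nil
  rw [PySem.List.sorted_eq_foldl_insertBy ps (fun p => p.2)]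
  simpa using hfold

-- the key of each run, mirroring pvRuns' recursion
def pvRKeys : List (String × Int) → List Int
  | [] => []
  | (_, m) :: rest => m :: pvRKeys (rest.dropWhile (fun p => p.2 == m))
termination_by s => s.length
decreasing_by
  simp only [List.length_cons]
  exact Nat.lt_succ_of_le (List.length_dropWhile_le _ _)

theorem pvRKeys_mem (s : List (String × Int)) (m' : Int) (h : m' ∈ pvRKeys s) :
    ∃ p ∈ s, p.2 = m' := by
  induction s using pvRKeys.induct with
  | case1 => simp [pvRKeys] at h
  | case2 q m rest ih =>
    rw [pvRKeys] at h
    rcases List.mem_cons.1 h with rfl | h₂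
    · exact ⟨(q, m'), by simp⟩
    · obtain ⟨p, hp, hpm⟩ := ih h₂
      exact ⟨p, List.mem_cons_of_mem _ ((List.dropWhile_sublist _).subset hp), hpm⟩

-- every element surviving the dropWhile has key strictly above m
theorem pvDrop_gt_aux (m : Int) (rest : List (String × Int))
    (hp : rest.Pairwise (fun a b => a.2 ≤ b.2)) (hge : ∀ p ∈ rest, m ≤ p.2) :
    ∀ p ∈ rest.dropWhile (fun p => p.2 == m), m < p.2 := by
  induction rest with
  | nil => simp
  | cons z zs ih =>
    by_cases hzm : z.2 = m
    · rw [List.dropWhile_cons]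
      simp only [hzm, beq_self_eq_true, if_true]
      exact ih hp.of_cons (fun p hpmem => hge p (List.mem_cons_of_mem _ hpmem))
    · rw [List.dropWhile_cons]
      simp only [beq_iff_eq, hzm, if_false]
      intro p hpmem
      have hzge : m ≤ z.2 := hge z (by simp)
      rcases List.mem_cons.1 hpmem with rfl | hpmem₂
      · omega
      · have := List.rel_of_pairwise_cons hp hpmem₂; omega

theorem pvDrop_gt (q : String) (m : Int) (rest : List (String × Int))
    (hs : ((q, m) :: rest).Pairwise (fun a b => a.2 ≤ b.2)) :
    ∀ p ∈ rest.dropWhile (fun p => p.2 == m), m < p.2 :=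
  pvDrop_gt_aux m rest hs.of_cons (fun _ hpmem => List.rel_of_pairwise_cons hs hpmem)

theorem pvFilter_eq_takeWhile (m : Int) (rest : List (String × Int))
    (hp : rest.Pairwise (fun a b => a.2 ≤ b.2)) (hge : ∀ p ∈ rest, m ≤ p.2) :
    rest.filter (fun p => p.2 == m) = rest.takeWhile (fun p => p.2 == m) := by
  induction rest with
  | nil => rfl
  | cons p ps ih =>
    by_cases hpm : p.2 = m
    · rw [List.filter_cons, List.takeWhile_cons]
      simp only [hpm, beq_self_eq_true, if_true]
      rw [ih hp.of_cons (fun z hz => hge z (List.mem_cons_of_mem _ hz))]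
    · have hgt : m < p.2 := by have := hge p (by simp); omega
      have hnil : (p :: ps).filter (fun p => p.2 == m) = [] := by
        rw [List.filter_eq_nil_iff]
        intro z hz
        rcases List.mem_cons.1 hz with rfl | hz₂
        · simp only [beq_iff_eq]; omega
        · have := List.rel_of_pairwise_cons hp hz₂
          simp only [beq_iff_eq]; omega
      rw [hnil, List.takeWhile_cons]
      simp [hpm]

theorem pvRuns_eq (s : List (String × Int)) (hs : s.Pairwise (fun a b => a.2 ≤ b.2)) :
    pvRuns s = (pvRKeys s).map
      (fun m => (s.filter (fun p => p.2 == m)).map (fun p => p.1)) := by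
  induction s using pvRuns.induct with
  | case1 => simp [pvRuns, pvRKeys]
  | case2 q m rest ih =>
    have hrest : ∀ p ∈ rest, m ≤ p.2 := fun p hpmem => List.rel_of_pairwise_cons hs hpmem
    have hdrop : (rest.dropWhile (fun p => p.2 == m)).Pairwise (fun a b => a.2 ≤ b.2) :=
      List.Pairwise.sublist (List.dropWhile_sublist _) hs.of_cons
    rw [pvRuns, pvRKeys, List.map_cons]
    congr 1
    · -- the first run is the filter at key m
      dsimp only
      rw [List.filter_cons]
      simp only [beq_self_eq_true, if_true, List.map_cons]
      rw [pvFilter_eq_takeWhile m rest hs.of_cons hrest]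
    · rw [ih hdrop]
      refine List.map_congr_left (fun m' hm' => ?_)
      obtain ⟨p, hpmem, hpm⟩ := pvRKeys_mem _ m' hm'
      have hgt : m < m' := hpm ▸ pvDrop_gt q m rest hs p hpmem
      have htk : (rest.takeWhile (fun p => p.2 == m)).filter (fun p => p.2 == m') = [] := by
        rw [List.filter_eq_nil_iff]
        intro z hz
        have hzk := List.mem_takeWhile_imp hz
        simp only [beq_iff_eq] at hzk ⊢
        omega
      have hsplit : rest.filter (fun p => p.2 == m')
          = (rest.takeWhile (fun p => p.2 == m)).filter (fun p => p.2 == m')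
            ++ (rest.dropWhile (fun p => p.2 == m)).filter (fun p => p.2 == m') := by
        conv_lhs => rw [← List.takeWhile_append_dropWhile (p := fun p => p.2 == m) (l := rest)]
        rw [List.filter_append]
      have hhd : (((q, m) :: rest).filter (fun p => p.2 == m'))
          = rest.filter (fun p => p.2 == m') := by
        rw [List.filter_cons]
        have : ¬ (((q, m).2 == m') = true) := by simp only [beq_iff_eq]; omega
        simp [this]
      rw [hhd, hsplit, htk, List.nil_append]

theorem pvRKeys_pairwise_lt (s : List (String × Int))
    (hs : s.Pairwise (fun a b => a.2 ≤ b.2)) : (pvRKeys s).Pairwise (· < ·) := by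
  induction s using pvRKeys.induct with
  | case1 => simp [pvRKeys]
  | case2 q m rest ih =>
    rw [pvRKeys]
    refine List.Pairwise.cons ?_
      (ih (List.Pairwise.sublist (List.dropWhile_sublist _) hs.of_cons))
    intro m' hm'
    obtain ⟨p, hpmem, hpm⟩ := pvRKeys_mem _ m' hm'
    exact hpm ▸ pvDrop_gt q m rest hs p hpmem

theorem pvRKeys_mem_iff (s : List (String × Int))
    (hs : s.Pairwise (fun a b => a.2 ≤ b.2)) (m' : Int) :
    m' ∈ pvRKeys s ↔ m' ∈ s.map (fun p => p.2) := by
  constructor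
  · intro h
    obtain ⟨p, hpmem, hpm⟩ := pvRKeys_mem _ m' h
    exact List.mem_map.2 ⟨p, hpmem, hpm⟩
  · intro h
    induction s using pvRKeys.induct with
    | case1 => simp at h
    | case2 q m rest ih =>
      rw [pvRKeys]
      obtain ⟨p, hpmem, hpm⟩ := List.mem_map.1 h
      rcases List.mem_cons.1 hpmem with rfl | hpmem₂
      · simp [← hpm]
      · by_cases hm : m' = m
        · simp [hm]
        · have hp₂ : p ∈ rest.takeWhile (fun p => p.2 == m) ++ rest.dropWhile (fun p => p.2 == m) := by
            rw [List.takeWhile_append_dropWhile]; exact hpmem₂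
          rcases List.mem_append.1 hp₂ with hp₃ | hp₃
          · have hpk := List.mem_takeWhile_imp hp₃
            simp only [beq_iff_eq] at hpk
            exact absurd (hpm ▸ hpk) hm
          · refine List.mem_cons_of_mem _
              (ih (List.Pairwise.sublist (List.dropWhile_sublist _) hs.of_cons) ?_)
            exact List.mem_map.2 ⟨p, hp₃, hpm⟩

theorem pvB_eq_C (qids : List String) (qid_to_mux : List (String × Int))
    (h : ∀ q ∈ qids, (PySem.Int.ofStr? q).isSome = true) :
    group_qids_by_mux_py_alt qids qid_to_mux = pvC (PySem.Dict.ofList qid_to_mux) qids := by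
  unfold group_qids_by_mux_py_alt
  rw [pvDecorate_eq (PySem.Dict.ofList qid_to_mux) qids h]
  dsimp only
  set d := PySem.Dict.ofList qid_to_mux with hd
  set ps := qids.map (fun q => (q, pvK d q)) with hps
  set s := PySem.List.sorted ps (fun p => p.2) with hsdef
  have hs : s.Pairwise (fun a b => a.2 ≤ b.2) := PySem.List.sorted_pairwise ps (fun p => p.2)
  rw [pvRuns_eq s hs]
  have hfil : ∀ m : Int, (s.filter (fun p => p.2 == m)).map (fun p => p.1)
      = qids.filter (fun q => pvK d q == m) := by
    intro m
    rw [hsdef, pvFilter_sorted ps m, hps, List.filter_map, List.map_map]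
    simp [Function.comp_def]
  have hmem : ∀ m : Int, m ∈ s.map (fun p => p.2) ↔ m ∈ qids.map (pvK d) := by
    intro m
    have hperm : (s.map (fun p => p.2)).Perm (ps.map (fun p => p.2)) :=
      (PySem.List.sorted_perm ps (fun p => p.2) false).map (fun p => p.2)
    rw [hperm.mem_iff, hps, List.map_map]
    simp [Function.comp_def]
  have hkeys : pvRKeys s = PySem.List.sorted (PySem.Set.ofList (qids.map (pvK d))) (fun m => m) := by
    refine (PySem.List.sorted_eq_of_perm_of_pairwise_lt _ _ _ ?_ ?_).symm
    · rw [List.perm_ext_iff_of_nodup (pvRKeys_pairwise_lt s hs).nodup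
        (PySem.Set.nodup_ofList _)]
      intro m
      rw [pvRKeys_mem_iff s hs m, PySem.Set.mem_ofList, hmem m]
    · exact pvRKeys_pairwise_lt s hs
  rw [hkeys]
  unfold pvC
  exact List.map_congr_left (fun m _ => hfil m)

-- ===== VERDICT (by name: the statement is the Claim_ definition above) =====
theorem group_qids_by_mux_py_spec : Claim_equal_group_qids_by_mux_py := by
  intro qids qid_to_mux _ hpre
  unfold Spec_group_qids_by_mux_py
  rw [pvA_eq_C qids qid_to_mux hpre, pvB_eq_C qids qid_to_mux hpre]
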